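-- pv_equiv track=rewrite | github.com/dad/lcscore | src/quantify-separators.py | maskSequence
-- ===== SOURCE A (Python) =====
-- def maskSequence(s, posts, pickets, postrep='p', picketrep='k', otherrep='x'):
-- 	res = ''
-- 	for aa in s:
-- 		if aa in posts:
-- 			res += postrep
-- 		elif aa in pickets:
-- 			res += picketrep
-- 		else:
-- 			res += otherrep
-- 	return ''.join(res)
-- ===== SOURCE B (Python) =====
-- def maskSequence(s, posts, pickets, postrep='p', picketrep='k', otherrep='x'):
--     # Staged overwrite passes: start from an all-'other' mask, then stamp picket
--     # positions, then post positions (posts last, so overlaps end up as postrep,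
--     # matching the original's branch priority).
--     out = [otherrep] * len(s)
--     for x in pickets:
--         for i, aa in enumerate(s):
--             if aa == x:
--                 out[i] = picketrep
--     for x in posts:
--         for i, aa in enumerate(s):
--             if aa == x:
--                 out[i] = postrep
--     return ''.join(out)
-- ===== Notes on version B (the rewrite author's own statement) =====
-- stated objective: alternative
-- what changed: Inverts the loop nesting: instead of branching per character of s over the two collections, B builds an all-otherrep output buffer and runs staged overwrite passes, one per element of pickets then posts (posts last so overlaps resolve like the elif priority), stamping matching positions, then joins the buffer once.
import Mathlib
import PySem

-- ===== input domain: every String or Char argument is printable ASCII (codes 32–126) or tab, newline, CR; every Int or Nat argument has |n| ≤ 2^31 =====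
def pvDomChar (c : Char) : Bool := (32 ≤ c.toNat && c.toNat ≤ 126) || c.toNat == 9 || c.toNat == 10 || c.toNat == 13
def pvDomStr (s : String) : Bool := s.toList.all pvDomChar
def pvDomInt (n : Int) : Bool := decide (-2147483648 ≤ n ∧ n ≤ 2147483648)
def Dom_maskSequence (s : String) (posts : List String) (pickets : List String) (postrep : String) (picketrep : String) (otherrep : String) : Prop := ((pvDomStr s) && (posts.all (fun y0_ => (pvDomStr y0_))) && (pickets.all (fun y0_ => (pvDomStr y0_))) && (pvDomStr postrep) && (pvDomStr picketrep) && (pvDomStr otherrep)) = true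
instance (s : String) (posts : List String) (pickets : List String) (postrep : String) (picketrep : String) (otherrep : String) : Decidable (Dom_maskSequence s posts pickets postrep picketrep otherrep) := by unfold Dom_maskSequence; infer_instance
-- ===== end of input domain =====

-- B inverts the loop nesting: an all-otherrep buffer is overwritten by one stamping pass per
-- element of pickets then posts (posts last, matching the elif priority), then joined.

-- ===== PORT A =====
def maskSequence (s : String) (posts : List String) (pickets : List String) (postrep : String) (picketrep : String) (otherrep : String) : String :=
  s.toList.foldl
    (fun res aa =>
      if String.ofList [aa] ∈ posts then res ++ postrep
      else if String.ofList [aa] ∈ pickets then res ++ picketrep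
      else res ++ otherrep)
    ""

-- ===== PORT B =====
-- the inner 'for i, aa in enumerate(s): if aa == x: out[i] = rep' loop, with the
-- enumerate counter as an explicit Nat index (Python's indices here are 0,1,2,… so exact)
def markPassAux (x rep : String) : List Char → Nat → List String → List String
  | [], _, out => out
  | aa :: t, i, out =>
      markPassAux x rep t (i + 1) (if String.ofList [aa] = x then out.set i rep else out)

def maskSequence_alt (s : String) (posts : List String) (pickets : List String) (postrep : String) (picketrep : String) (otherrep : String) : String :=
  let out := List.replicate s.toList.length otherrep
  let out := pickets.foldl (fun out x => markPassAux x picketrep s.toList 0 out) out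
  let out := posts.foldl (fun out x => markPassAux x postrep s.toList 0 out) out
  PySem.Str.join "" out

-- ===== PRECONDITION & SPEC =====
def Spec_maskSequence (s : String) (posts : List String) (pickets : List String) (postrep : String) (picketrep : String) (otherrep : String) (out : String) : Prop := out = maskSequence_alt s posts pickets postrep picketrep otherrep
instance (s : String) (posts : List String) (pickets : List String) (postrep : String) (picketrep : String) (otherrep : String) (out : String) : Decidable (Spec_maskSequence s posts pickets postrep picketrep otherrep out) := by unfold Spec_maskSequence; infer_instance

-- ===== CLAIM (what is proved, stated in full; the proofs are below) =====
def Claim_equal_maskSequence : Prop := ∀ (s : String) (posts : List String) (pickets : List String) (postrep : String) (picketrep : String) (otherrep : String), Dom_maskSequence s posts pickets postrep picketrep otherrep → Spec_maskSequence s posts pickets postrep picketrep otherrep (maskSequence s posts pickets postrep picketrep otherrep)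

-- ===== LEMMAS AND PROOFS =====

-- one stamping pass, in zipWith form
theorem markPassAux_eq_zipWith (x rep : String) (s : List Char) :
    ∀ (i : Nat) (out : List String), out.length = i + s.length →
    markPassAux x rep s i out
      = out.take i ++ List.zipWith (fun aa o => if String.ofList [aa] = x then rep else o) s (out.drop i) := by
  induction s with
  | nil =>
    intro i out h
    simp only [List.length_nil, Nat.add_zero] at h
    simp [markPassAux, List.take_of_length_le (Nat.le_of_eq h),
      List.drop_of_length_le (Nat.le_of_eq h)]
  | cons aa t ih =>
    intro i out h
    have hi : i < out.length := by simp at h; omega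
    have hdrop : out.drop i = out[i] :: out.drop (i + 1) := List.drop_eq_getElem_cons hi
    set out' := (if String.ofList [aa] = x then out.set i rep else out) with hout'
    have hlen' : out'.length = (i + 1) + t.length := by
      rw [hout']; split <;> simp at h ⊢ <;> omega
    have htake' : out'.take (i + 1) = out.take i ++ [if String.ofList [aa] = x then rep else out[i]] := by
      rw [hout']; split
      · rw [List.take_succ_eq_append_getElem (by simpa using hi), List.take_set_of_le]
        · simp
        · exact Nat.le_refl i
      · rw [List.take_succ_eq_append_getElem hi]
    have hdrop' : out'.drop (i + 1) = out.drop (i + 1) := by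
      rw [hout']; split
      · rw [List.drop_set]; simp
      · rfl
    rw [markPassAux, ih (i + 1) out' hlen', htake', hdrop', hdrop]
    rw [List.zipWith_cons_cons, List.append_assoc, List.singleton_append]

theorem zipWith_zipWith_self {α β : Type} (f g : α → β → β) (s : List α) (out : List β) :
    List.zipWith f s (List.zipWith g s out) = List.zipWith (fun a b => f a (g a b)) s out := by
  induction s generalizing out with
  | nil => simp
  | cons a t ih => cases out <;> simp [ih]

theorem zipWith_congr_fun {α β γ : Type} (f g : α → β → γ) (s : List α) (out : List β)
    (h : ∀ a b, f a b = g a b) :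
    List.zipWith f s out = List.zipWith g s out := by
  induction s generalizing out with
  | nil => simp
  | cons a t ih => cases out <;> simp [h, ih]

theorem zipWith_map_self {α β : Type} (f : α → β → β) (g : α → β) (s : List α) :
    List.zipWith f s (s.map g) = s.map (fun a => f a (g a)) := by
  induction s with
  | nil => simp
  | cons a t ih => simp [ih]

theorem zipWith_id_right {α β : Type} (s : List α) (out : List β) (h : out.length = s.length) :
    List.zipWith (fun _ o => o) s out = out := by
  induction s generalizing out with
  | nil => cases out <;> simp_all
  | cons a t ih => cases out <;> simp_all

-- a whole stage: one pass per element of l, all writing the same rep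
theorem foldl_markPass (l : List String) (rep : String) (s : List Char) (out : List String)
    (h : out.length = s.length) :
    l.foldl (fun out x => markPassAux x rep s 0 out) out
      = List.zipWith (fun aa o => if String.ofList [aa] ∈ l then rep else o) s out := by
  induction l generalizing out with
  | nil =>
    simp only [List.foldl_nil, List.not_mem_nil, if_neg (fun hf => hf)]
    rw [zipWith_congr_fun _ (fun _ o => o) _ _ (by intro a b; simp),
      zipWith_id_right _ _ h]
  | cons a t ih =>
    simp only [List.foldl_cons]
    have h1 := markPassAux_eq_zipWith a rep s 0 out (by simpa using h)
    simp only [List.take_zero, List.drop_zero, List.nil_append] at h1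
    rw [h1, ih _ (by simp [h]), zipWith_zipWith_self]
    apply zipWith_congr_fun
    intro aa o
    by_cases hm : String.ofList [aa] ∈ t <;> by_cases he : String.ofList [aa] = a <;>
      simp [hm, he]

theorem zipWith_replicate_right {α β : Type} (f : α → β → β) (s : List α) (b : β) :
    List.zipWith f s (List.replicate s.length b) = s.map (fun a => f a b) := by
  induction s with
  | nil => simp
  | cons a t ih => simp [List.replicate_succ, ih]

theorem interc_nil (l : List (List Char)) :
    ([] : List Char).intercalate l = l.flatten := by
  induction l with
  | nil => rfl
  | cons a t ih =>
    cases t with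
    | nil => simp [List.intercalate, List.intersperse]
    | cons b t2 =>
      simp only [List.intercalate, List.intersperse] at *
      simp [List.flatten] at *
      simpa using ih

theorem join_empty_cons (x : String) (xs : List String) :
    PySem.Str.join "" (x :: xs) = x ++ PySem.Str.join "" xs := by
  simp only [PySem.Str.join, PySem.Chars.join,
    show ("".toList : List Char) = [] from rfl, interc_nil, List.map_cons, List.flatten_cons,
    String.ofList_append, String.ofList_toList]

theorem foldl_append_eq_join (l : List Char) (f : Char → String) (acc : String) :
    l.foldl (fun r a => r ++ f a) acc = acc ++ PySem.Str.join "" (l.map f) := by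
  induction l generalizing acc with
  | nil => simp [PySem.Str.join, PySem.Chars.join, List.intercalate]
  | cons a t ih =>
    simp only [List.foldl_cons, List.map_cons, ih, join_empty_cons, String.append_assoc]

-- ===== VERDICT =====
theorem maskSequence_spec : Claim_equal_maskSequence := by
  intro s posts pickets postrep picketrep otherrep _
  unfold Spec_maskSequence
  simp only [maskSequence, maskSequence_alt]
  rw [foldl_markPass pickets picketrep s.toList _ (by simp),
      zipWith_replicate_right,
      foldl_markPass posts postrep s.toList _ (by simp),
      zipWith_map_self]
  rw [show (List.foldl
      (fun res aa =>
        if String.ofList [aa] ∈ posts then res ++ postrep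
        else if String.ofList [aa] ∈ pickets then res ++ picketrep else res ++ otherrep)
      "" s.toList)
    = List.foldl (fun res aa => res ++
        (if String.ofList [aa] ∈ posts then postrep
         else if String.ofList [aa] ∈ pickets then picketrep else otherrep)) "" s.toList from by
      apply PySem.List.foldl_congr_mem
      intro b aa _
      split_ifs <;> rfl]
  rw [foldl_append_eq_join]
  simp
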